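-- pv_equiv track=rewrite | github.com/tgrx/Z19 | homeworks/diana_okrut/lesson05/lesson05.py | TypedReversed
-- ===== SOURCE A (Python) =====
-- def TypedReversed(l):
--     if not isinstance(l, (str, tuple, list)):
--         return "Введенные данные не соответствуют условию."
--     new_l = []
--     count = 0
--     for i in l:
--         x = l[count]
--         new_l.insert(0, x)
--         count += 1
--     if type(l) is str:
--         return "".join(new_l)
--     elif type(l) is tuple:
--         return tuple(new_l)
--     else:
--         return new_l
-- ===== SOURCE B (Python) =====
-- def TypedReversed(l):
--     if not isinstance(l, (str, tuple, list)):
--         return "Введенные данные не соответствуют условию."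
--     buf = list(l)
--     i = 0
--     j = len(buf) - 1
--     while i < j:
--         buf[i], buf[j] = buf[j], buf[i]
--         i += 1
--         j -= 1
--     if type(l) is str:
--         return "".join(buf)
--     elif type(l) is tuple:
--         return tuple(buf)
--     else:
--         return buf
-- ===== Notes on version B (the rewrite author's own statement) =====
-- stated objective: faster
-- what changed: Replaced A's forward scan that prepends each element with new_l.insert(0, x) (an O(n) shift per element) by an in-place two-pointer reversal of a single buffer, swapping ends toward the middle.
import Mathlib
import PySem

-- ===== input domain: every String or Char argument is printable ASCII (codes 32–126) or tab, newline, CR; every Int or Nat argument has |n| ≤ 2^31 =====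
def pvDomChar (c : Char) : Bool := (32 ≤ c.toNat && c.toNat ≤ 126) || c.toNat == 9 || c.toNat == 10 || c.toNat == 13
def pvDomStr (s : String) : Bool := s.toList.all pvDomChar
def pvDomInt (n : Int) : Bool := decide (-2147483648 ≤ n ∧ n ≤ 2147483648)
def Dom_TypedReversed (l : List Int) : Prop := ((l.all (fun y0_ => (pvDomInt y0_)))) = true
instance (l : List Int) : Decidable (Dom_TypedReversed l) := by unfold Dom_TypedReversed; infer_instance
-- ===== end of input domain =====

-- B replaces A's quadratic build (insert at index 0 per element) by a linear in-place two-pointer swap reversal.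
-- (The Python signature also accepts str/tuple/non-sequence inputs; under the type convention here l : List Int,
--  so only the list branch is ported, identically in A and B.)

-- ===== PORT A =====
-- A's loop: for i in l: x = l[count]; new_l.insert(0, x); count += 1
def trLoopA (orig : List Int) : List Int → List Int → Int → List Int
  | [], new_l, _ => new_l
  | _ :: rest, new_l, count =>
    match PySem.List.pyGet? orig count with
    | some x => trLoopA orig rest (PySem.List.insert new_l 0 x) (count + 1)
    | none => new_l  -- totality guard only; unreachable (count < len orig whenever read)

def TypedReversed (l : List Int) : List Int := trLoopA l l [] 0

-- ===== PORT B =====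
-- B's loop: while i < j: buf[i], buf[j] = buf[j], buf[i]; i += 1; j -= 1
def trSwap (buf : List Int) (i j : Int) : List Int :=
  if h : i < j then
    trSwap (PySem.List.pySetD (PySem.List.pySetD buf i (PySem.List.pyGetD buf j 0)) j
              (PySem.List.pyGetD buf i 0)) (i + 1) (j - 1)
  else buf
termination_by (j - i).toNat
decreasing_by omega

def TypedReversed_alt (l : List Int) : List Int := trSwap l 0 ((l.length : Int) - 1)

-- ===== PRECONDITION & SPEC =====
def Spec_TypedReversed (l : List Int) (out : List Int) : Prop := out = TypedReversed_alt l
instance (l : List Int) (out : List Int) : Decidable (Spec_TypedReversed l out) := by unfold Spec_TypedReversed; infer_instance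

-- ===== CLAIM (what is proved, stated in full; the proofs are below) =====
def Claim_equal_TypedReversed : Prop := ∀ (l : List Int), Dom_TypedReversed l → Spec_TypedReversed l (TypedReversed l)

-- ===== LEMMAS AND PROOFS =====

theorem trLoopA_reverse : ∀ (t pre acc : List Int),
    trLoopA (pre ++ t) t acc (pre.length : Int) = t.reverse ++ acc := by
  intro t
  induction t with
  | nil => intro pre acc; simp [trLoopA]
  | cons x rest ih =>
    intro pre acc
    have hrw : pre ++ x :: rest = (pre ++ [x]) ++ rest := by simp
    rw [trLoopA, PySem.List.pyGet?_append_length]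
    have hcnt : (pre.length : Int) + 1 = ((pre ++ [x]).length : Int) := by
      simp
    simp only [PySem.List.insert_zero]
    rw [hcnt, hrw, ih (pre ++ [x]) (x :: acc)]
    simp

theorem TypedReversed_eq_reverse (l : List Int) : TypedReversed l = l.reverse := by
  have := trLoopA_reverse l [] []
  simpa [TypedReversed] using this

theorem trSwap_inv (n : Nat) : ∀ (M A B : List Int), M.length = n → B.length = A.length →
    trSwap (A ++ M ++ B) (A.length : Int) ((A.length : Int) + (M.length : Int) - 1)
      = A ++ M.reverse ++ B := by
  induction n using Nat.strong_induction_on with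
  | _ n ih =>
    intro M A B hM hB
    rw [trSwap]
    split
    · rename_i hlt
      have hM2 : 2 ≤ M.length := by omega
      obtain ⟨m0, M1, rfl⟩ : ∃ m0 M1, M = m0 :: M1 := by
        cases M with
        | nil => simp at hM2
        | cons a b => exact ⟨a, b, rfl⟩
      obtain ⟨mid, mN, rfl⟩ : ∃ mid mN, M1 = mid ++ [mN] := by
        rcases List.eq_nil_or_concat M1 with h | ⟨mid, mN, h⟩
        · subst h; simp at hM2
        · exact ⟨mid, mN, by simpa using h⟩
      have hj : ((A.length : Int)) + (((m0 :: (mid ++ [mN])).length : Int)) - 1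
          = ((A.length + (mid.length + 1) : Nat) : Int) := by simp; ring
      rw [hj]
      simp only [PySem.List.pySetD_natCast, PySem.List.pyGetD_natCast]
      have hbuf : A ++ (m0 :: (mid ++ [mN])) ++ B = (A ++ m0 :: mid) ++ (mN :: B) := by simp
      have g1 : (A ++ (m0 :: (mid ++ [mN])) ++ B).getD (A.length + (mid.length + 1)) 0 = mN := by
        rw [hbuf, List.getD_append_right _ _ _ _ (by simp)]
        simp
      have g2 : (A ++ (m0 :: (mid ++ [mN])) ++ B).getD A.length 0 = m0 := by
        rw [List.append_assoc, List.getD_append_right _ _ _ _ (by omega)]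
        simp
      rw [g1, g2]
      have s1 : (A ++ (m0 :: (mid ++ [mN])) ++ B).set A.length mN
          = (A ++ mN :: mid) ++ (mN :: B) := by
        rw [hbuf, List.set_append_left _ _ (by simp), List.set_append_right _ _ (by omega)]
        simp
      rw [s1]
      have s2 : ((A ++ mN :: mid) ++ (mN :: B)).set (A.length + (mid.length + 1)) m0
          = ((A ++ [mN]) ++ mid) ++ (m0 :: B) := by
        rw [List.set_append_right _ _ (by simp)]
        simp
      rw [s2]
      have hrec := ih mid.length (by omega) mid (A ++ [mN]) (m0 :: B) rfl (by simp [hB])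
      have hi : ((A.length : Int)) + 1 = (((A ++ [mN]).length : Int)) := by simp
      have hj2 : ((A.length + (mid.length + 1) : Nat) : Int) - 1
          = (((A ++ [mN]).length : Int)) + ((mid.length : Int)) - 1 := by simp; ring
      rw [hi, hj2]
      rw [hrec]
      simp
    · rename_i hge
      have hM1 : M.length ≤ 1 := by omega
      have : M.reverse = M := by
        cases M with
        | nil => rfl
        | cons a b => cases b with
          | nil => rfl
          | cons c d => simp at hM1
      rw [this]

-- ===== VERDICT (by name: the statement is the Claim_ definition above) =====
theorem TypedReversed_alt_eq_reverse (l : List Int) : TypedReversed_alt l = l.reverse := by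
  have h := trSwap_inv l.length l [] [] rfl rfl
  simpa [TypedReversed_alt] using h

theorem TypedReversed_spec : Claim_equal_TypedReversed := by
  intro l _
  unfold Spec_TypedReversed
  rw [TypedReversed_eq_reverse, TypedReversed_alt_eq_reverse]
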